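-- pv_equiv track=rewrite | github.com/AlexisHerrera/2021-1C-datos | ir/parciales_codigo/inf_retriev.py | crear_lexico_front_coding
-- ===== SOURCE A (Python) =====
-- def iguales_anterior(anterior,posterior):
--     iguales = 0
--     for i in range(min(len(anterior),len(posterior))):
--         if posterior[i] == anterior[i]:
--             iguales +=1
--         else:
--             break
--     return iguales
--
-- def crear_lexico_front_coding(terminos,n=None):
--     if n ==None:
--         n=len(terminos)
--     ultima_palabra = None
--     indice = [0]
--     iguales = []
--     distintos = []
--     front_coding_terminos = []
--     indice_actual = 0
--     len_anterior = 0
--     for termino in terminos: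
--         if not(indice_actual%n):
--             iguales.append(0)
--             distintos.append(len(termino))
--             front_coding_terminos.append(termino)
--         else:
--             igual_anterior = iguales_anterior(ultima_palabra,termino)
--             iguales.append(igual_anterior)
--             distintos.append(len(termino)-igual_anterior)
--             front_coding_terminos.append(termino[igual_anterior:])
--         if indice_actual != 0:
--             indice.append(indice[indice_actual-1]+distintos[indice_actual-1])
--         indice_actual += 1
--         len_anterior += len(termino)
--         ultima_palabra = termino
--     lexico = iguales,distintos,indice,front_coding_terminos
--     return lexico
-- ===== SOURCE B (Python) =====
-- # B: staged-pass re-implementation; common-prefix length found by binary search on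
-- # slice equality (the predicate "prev[:k]==term[:k]" is monotone in k), then the four
-- # output vectors are derived in separate passes plus a prefix-sum for the index.
-- def _prefix_len(prev, term):
--     lo, hi = 0, min(len(prev), len(term))
--     while lo < hi:
--         mid = (lo + hi + 1) // 2
--         if prev[:mid] == term[:mid]:
--             lo = mid
--         else:
--             hi = mid - 1
--     return lo
--
-- def crear_lexico_front_coding(terminos, n=None):
--     if n is None:
--         n = len(terminos)
--     shifted = [''] + terminos[:-1]
--     iguales = [0 if i % n == 0 else _prefix_len(p, t)
--                for i, (p, t) in enumerate(zip(shifted, terminos))]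
--     distintos = [len(t) - k for t, k in zip(terminos, iguales)]
--     front_coding_terminos = [t[k:] for t, k in zip(terminos, iguales)]
--     indice = [0]
--     for d in distintos[:-1]:
--         indice.append(indice[-1] + d)
--     return iguales, distintos, indice, front_coding_terminos
-- ===== Notes on version B (the rewrite author's own statement) =====
-- stated objective: alternative
-- what changed: B finds each common-prefix length by binary search on the monotone slice-equality predicate prev[:k]==term[:k] instead of A's linear character scan, and replaces A's single interleaved stateful loop by staged vector passes (a shifted-zip comprehension for iguales, derived maps for distintos and the coded terms, and a separate prefix-sum pass for the index).
import Mathlib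
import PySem

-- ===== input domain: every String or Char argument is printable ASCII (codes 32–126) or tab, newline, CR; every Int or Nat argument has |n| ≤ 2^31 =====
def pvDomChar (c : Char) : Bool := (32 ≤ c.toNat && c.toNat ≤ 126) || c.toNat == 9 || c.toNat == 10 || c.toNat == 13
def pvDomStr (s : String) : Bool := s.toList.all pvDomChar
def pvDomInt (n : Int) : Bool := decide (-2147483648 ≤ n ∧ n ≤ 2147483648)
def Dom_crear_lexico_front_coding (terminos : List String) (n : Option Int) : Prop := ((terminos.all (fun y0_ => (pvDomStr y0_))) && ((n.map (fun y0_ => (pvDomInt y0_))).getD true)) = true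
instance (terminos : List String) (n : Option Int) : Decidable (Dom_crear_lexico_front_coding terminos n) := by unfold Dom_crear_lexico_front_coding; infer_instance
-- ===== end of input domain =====

-- B replaces A's interleaved stateful loop by staged passes (shifted-zip comprehension for iguales,
-- derived maps, prefix-sum for the index) and finds common-prefix lengths by binary search on slice
-- equality; equal return values on Pre_ (A raises ZeroDivisionError on n=0 with nonempty terminos).

-- ===== PORT A =====
-- A's helper: for i in range(min(len,len)) with break, as structural recursion on the char lists
def iguales_anterior : List Char → List Char → Int
  | a :: as, p :: ps => if p == a then 1 + iguales_anterior as ps else 0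
  | _, _ => 0

-- one iteration of A's loop; state = (ultima_palabra, indice, iguales, distintos, fct, indice_actual, len_anterior)
-- ultima.getD "" : ultima_palabra is only read when indice_actual % n ≠ 0, where it is never None;
-- termino[ig:] with 0 ≤ ig is exactly toList.drop ig.toNat; the pyGet? indices are always in range, .getD 0 totalizes
def pvStepA (nv : Int)
    (s : Option String × List Int × List Int × List Int × List String × Int × Int)
    (termino : String) :
    Option String × List Int × List Int × List Int × List String × Int × Int :=
  let ultima := s.1
  let indice := s.2.1
  let iguales := s.2.2.1
  let distintos := s.2.2.2.1
  let fct := s.2.2.2.2.1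
  let ia := s.2.2.2.2.2.1
  let lenant := s.2.2.2.2.2.2
  let t3 : List Int × List Int × List String :=
    if PySem.Int.mod ia nv = 0 then
      (iguales ++ [0], distintos ++ [(termino.toList.length : Int)], fct ++ [termino])
    else
      let ig := iguales_anterior (ultima.getD "").toList termino.toList
      (iguales ++ [ig], distintos ++ [(termino.toList.length : Int) - ig],
        fct ++ [String.ofList (termino.toList.drop ig.toNat)])
  let indice' :=
    if ia ≠ 0 then
      indice ++ [(PySem.List.pyGet? indice (ia - 1)).getD 0 + (PySem.List.pyGet? t3.2.1 (ia - 1)).getD 0]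
    else indice
  (some termino, indice', t3.1, t3.2.1, t3.2.2, ia + 1, lenant + (termino.toList.length : Int))

def crear_lexico_front_coding (terminos : List String) (n : Option Int) : List Int × List Int × List Int × List String :=
  let nv : Int := match n with | none => (terminos.length : Int) | some v => v
  let st := terminos.foldl (pvStepA nv) (none, [0], [], [], [], 0, 0)
  (st.2.2.1, st.2.2.2.1, st.2.1, st.2.2.2.2.1)

-- ===== PORT B =====
-- B's while-loop binary search; lo, hi are always ≥ 0 in B, so Nat carries the same values
-- (mid = (lo+hi+1)//2 on nonnegative ints is Nat division); fuel = initial hi-lo bound, strictly decreasing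
def pvBSearch (pred : Nat → Bool) : Nat → Nat → Nat → Nat
  | lo, _, 0 => lo
  | lo, hi, fuel+1 =>
    if lo < hi then
      let mid := (lo + hi + 1) / 2
      if pred mid then pvBSearch pred mid hi fuel else pvBSearch pred lo (mid - 1) fuel
    else lo

-- indice.append(indice[-1] + d)
def pvIndiceStep (acc : List Int) (d : Int) : List Int :=
  acc ++ [(PySem.List.pyGet? acc (-1)).getD 0 + d]

-- _prefix_len: binary search on the predicate prev[:k] == term[:k] (slices = take k)
def pvPrefixLen (prev term : String) : Int :=
  let a := prev.toList
  let b := term.toList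
  let m := min a.length b.length
  ((pvBSearch (fun k => a.take k == b.take k) 0 m m : Nat) : Int)

def crear_lexico_front_coding_alt (terminos : List String) (n : Option Int) : List Int × List Int × List Int × List String :=
  let nv : Int := match n with | none => (terminos.length : Int) | some v => v
  let shifted := "" :: terminos.dropLast          -- [''] + terminos[:-1]
  let iguales := (PySem.List.enumerate (shifted.zip terminos) 0).map
      (fun q => if PySem.Int.mod q.1 nv = 0 then (0 : Int) else pvPrefixLen q.2.1 q.2.2)
  let distintos := (terminos.zip iguales).map (fun q => (q.1.toList.length : Int) - q.2)
  let front := (terminos.zip iguales).map (fun q => String.ofList (q.1.toList.drop q.2.toNat))  -- t[k:], 0 ≤ k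
  let indice := distintos.dropLast.foldl pvIndiceStep [0]
  (iguales, distintos, indice, front)

-- ===== PRECONDITION & SPEC =====
-- Pre_ excludes only the inputs where A raises: nonempty terminos with n = 0 (ZeroDivisionError on indice_actual % n)
def Pre_crear_lexico_front_coding (terminos : List String) (n : Option Int) : Prop :=
  terminos = [] ∨ n ≠ some 0
instance (terminos : List String) (n : Option Int) : Decidable (Pre_crear_lexico_front_coding terminos n) := by
  unfold Pre_crear_lexico_front_coding; infer_instance
def pvWitness_crear_lexico_front_coding : List String × Option Int := (["aa", "ab", "b"], some 2)

def Spec_crear_lexico_front_coding (terminos : List String) (n : Option Int) (out : List Int × List Int × List Int × List String) : Prop := out = crear_lexico_front_coding_alt terminos n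
instance (terminos : List String) (n : Option Int) (out : List Int × List Int × List Int × List String) : Decidable (Spec_crear_lexico_front_coding terminos n out) := by unfold Spec_crear_lexico_front_coding; infer_instance

-- ===== CLAIM (what is proved, stated in full; the proofs are below) =====
def Claim_equal_crear_lexico_front_coding : Prop := ∀ (terminos : List String) (n : Option Int), Dom_crear_lexico_front_coding terminos n → Pre_crear_lexico_front_coding terminos n → Spec_crear_lexico_front_coding terminos n (crear_lexico_front_coding terminos n)

-- ===== LEMMAS AND PROOFS =====

-- the triple A's iteration produces for one term
def pvTriple (nv : Int) (prev : Option String) (ia : Int) (t : String) : Int × Int × String :=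
  if PySem.Int.mod ia nv = 0 then (0, (t.toList.length : Int), t)
  else
    let ig := iguales_anterior (prev.getD "").toList t.toList
    (ig, (t.toList.length : Int) - ig, String.ofList (t.toList.drop ig.toNat))

-- the sequence of triples A's loop produces
def triA (nv : Int) : Option String → Int → List String → List (Int × Int × String)
  | _, _, [] => []
  | prev, ia, t :: ts => pvTriple nv prev ia t :: triA nv (some t) (ia + 1) ts

lemma pyGet?_neg_one {α : Type} (xs : List α) (h : xs ≠ []) :
    PySem.List.pyGet? xs (-1) = some (xs.getLast h) := by
  have hl : xs.length ≠ 0 := by simpa using h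
  simp only [PySem.List.pyGet?, PySem.List.pyIdx?]
  rw [if_neg (by omega), if_pos (by simp; omega)]
  simp only [Option.bind_some]
  have hx : (xs.length - (-(-1:Int)).toNat) = xs.length - 1 := by omega
  rw [hx, List.getElem?_eq_getElem (by omega), List.getLast_eq_getElem]

lemma pyGet?_of_lt {α : Type} (xs : List α) (i : Int) (h0 : 0 ≤ i) (h1 : i < (xs.length : Int)) :
    PySem.List.pyGet? xs i = some (xs[i.toNat]'(by omega)) := by
  simp only [PySem.List.pyGet?, PySem.List.pyIdx?]
  rw [if_pos h0, if_pos h1]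
  simp only [Option.bind_some]
  rw [List.getElem?_eq_getElem (by omega)]

lemma pvIndice_len (ds acc : List Int) :
    (ds.foldl pvIndiceStep acc).length = acc.length + ds.length := by
  induction ds generalizing acc with
  | nil => simp
  | cons d ds ih =>
    simp only [List.foldl_cons]
    rw [ih]
    simp [pvIndiceStep]
    omega

lemma pvIndice_snoc (di : List Int) (h : di ≠ []) :
    di.foldl pvIndiceStep [0] =
      di.dropLast.foldl pvIndiceStep [0] ++
        [(PySem.List.pyGet? (di.dropLast.foldl pvIndiceStep [0]) (-1)).getD 0 + di.getLast h] := by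
  conv_lhs => rw [← List.dropLast_append_getLast h]
  rw [List.foldl_append]
  rfl

-- the index update of one A-iteration preserves the prefix-sum-fold invariant
lemma indstep (di : List Int) (d : Int) :
    (if ((di.length : Int)) ≠ 0 then
        (di.dropLast.foldl pvIndiceStep [0]) ++
          [(PySem.List.pyGet? (di.dropLast.foldl pvIndiceStep [0]) ((di.length : Int) - 1)).getD 0 +
            (PySem.List.pyGet? (di ++ [d]) ((di.length : Int) - 1)).getD 0]
      else di.dropLast.foldl pvIndiceStep [0])
    = (di ++ [d]).dropLast.foldl pvIndiceStep [0] := by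
  rcases eq_or_ne di [] with hdi | hdi
  · subst hdi; simp
  · have hlen : di.length ≠ 0 := by simpa using hdi
    rw [if_pos (by exact_mod_cast hlen), List.dropLast_concat, pvIndice_snoc di hdi]
    congr 1
    set ind := di.dropLast.foldl pvIndiceStep [0] with hind
    have hindlen : ind.length = di.length := by
      have hdl : di.dropLast.length = di.length - 1 := by simp
      rw [hind, pvIndice_len, hdl]
      simp only [List.length_cons, List.length_nil]
      omega
    have hindne : ind ≠ [] := by
      intro hc
      rw [hc] at hindlen
      simp at hindlen
      omega
    have hidx : ((di.length : Int) - 1).toNat = ind.length - 1 := by omega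
    have e1 : PySem.List.pyGet? ind ((di.length : Int) - 1) = some (ind.getLast hindne) := by
      rw [pyGet?_of_lt ind _ (by omega) (by omega), List.getLast_eq_getElem]
      congr 1
      simp only [hidx]
    have e2 : PySem.List.pyGet? (di ++ [d]) ((di.length : Int) - 1) = some (di.getLast hdi) := by
      rw [pyGet?_of_lt _ _ (by omega) (by simp)]
      have hk : (((di.length : Int) - 1)).toNat < di.length := by omega
      rw [List.getElem_append_left hk, List.getLast_eq_getElem]
      have hidx2 : ((di.length : Int) - 1).toNat = di.length - 1 := by omega
      simp only [hidx2]
    rw [e1, e2, pyGet?_neg_one ind hindne]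
    simp

-- characterisation of A's loop: from a consistent state it appends exactly the triA triples,
-- and the index stays the prefix-sum fold of distintos.dropLast
lemma foldA (nv : Int) (ts : List String) :
    ∀ (prev : Option String) (ig di : List Int) (fc : List String) (la : Int),
    ig.length = di.length → fc.length = di.length →
    (ts.foldl (pvStepA nv) (prev, di.dropLast.foldl pvIndiceStep [0], ig, di, fc, (di.length : Int), la)).2.2.1
        = ig ++ (triA nv prev (di.length : Int) ts).map (fun c => c.1) ∧
    (ts.foldl (pvStepA nv) (prev, di.dropLast.foldl pvIndiceStep [0], ig, di, fc, (di.length : Int), la)).2.2.2.1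
        = di ++ (triA nv prev (di.length : Int) ts).map (fun c => c.2.1) ∧
    (ts.foldl (pvStepA nv) (prev, di.dropLast.foldl pvIndiceStep [0], ig, di, fc, (di.length : Int), la)).2.2.2.2.1
        = fc ++ (triA nv prev (di.length : Int) ts).map (fun c => c.2.2) ∧
    (ts.foldl (pvStepA nv) (prev, di.dropLast.foldl pvIndiceStep [0], ig, di, fc, (di.length : Int), la)).2.1
        = (di ++ (triA nv prev (di.length : Int) ts).map (fun c => c.2.1)).dropLast.foldl pvIndiceStep [0] := by
  induction ts with
  | nil => intro prev ig di fc la h1 h2; simp [triA]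
  | cons t ts ih =>
    intro prev ig di fc la h1 h2
    by_cases hm : PySem.Int.mod ((di.length : Int)) nv = 0
    · simp only [List.foldl_cons, pvStepA, hm, if_true]
      rw [indstep di ((t.toList.length : Int))]
      have hcast : (((di ++ [(t.toList.length : Int)]).length : Int)) = (di.length : Int) + 1 := by
        simp
      have H := ih (some t) (ig ++ [0]) (di ++ [(t.toList.length : Int)]) (fc ++ [t])
        (la + (t.toList.length : Int)) (by simp [h1]) (by simp [h2])
      rw [hcast] at H
      obtain ⟨H1, H2, H3, H4⟩ := H
      refine ⟨?_, ?_, ?_, ?_⟩ <;>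
        simp only [H1, H2, H3, H4, triA, pvTriple, hm, if_true, List.map_cons,
          List.append_assoc, List.cons_append, List.nil_append]
    · simp only [List.foldl_cons, pvStepA, hm, if_false]
      rw [indstep di ((t.toList.length : Int) - iguales_anterior (prev.getD "").toList t.toList)]
      have hcast : (((di ++ [(t.toList.length : Int) - iguales_anterior (prev.getD "").toList t.toList]).length : Int)) = (di.length : Int) + 1 := by
        simp
      have H := ih (some t) (ig ++ [iguales_anterior (prev.getD "").toList t.toList])
        (di ++ [(t.toList.length : Int) - iguales_anterior (prev.getD "").toList t.toList])
        (fc ++ [String.ofList (t.toList.drop (iguales_anterior (prev.getD "").toList t.toList).toNat)])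
        (la + (t.toList.length : Int)) (by simp [h1]) (by simp [h2])
      rw [hcast] at H
      obtain ⟨H1, H2, H3, H4⟩ := H
      refine ⟨?_, ?_, ?_, ?_⟩ <;>
        simp only [H1, H2, H3, H4, triA, pvTriple, hm, if_false, List.map_cons,
          List.append_assoc, List.cons_append, List.nil_append]

-- ---- binary search = A's linear prefix scan ----

-- Nat-valued version of A's helper
def natIg : List Char → List Char → Nat
  | a :: as, p :: ps => if p == a then natIg as ps + 1 else 0
  | _, _ => 0

lemma iguales_eq_natIg (a b : List Char) : iguales_anterior a b = (natIg a b : Int) := by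
  induction a generalizing b with
  | nil => cases b <;> simp [iguales_anterior, natIg]
  | cons x xs ih =>
    cases b with
    | nil => simp [iguales_anterior, natIg]
    | cons y ys =>
      by_cases h : y = x
      · simp [iguales_anterior, natIg, h, ih]; ring
      · simp [iguales_anterior, natIg, h]

lemma natIg_le (a b : List Char) : natIg a b ≤ min a.length b.length := by
  induction a generalizing b with
  | nil => cases b <;> simp [natIg]
  | cons x xs ih =>
    cases b with
    | nil => simp [natIg]
    | cons y ys =>
      by_cases h : y = x
      · have := ih ys
        simp [natIg, h]
        omega
      · simp [natIg, h]

lemma take_eq_iff (a b : List Char) :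
    ∀ k, k ≤ min a.length b.length → (a.take k = b.take k ↔ k ≤ natIg a b) := by
  induction a generalizing b with
  | nil => intro k hk; simp at hk; simp [hk]
  | cons x xs ih =>
    cases b with
    | nil => intro k hk; simp at hk; simp [hk]
    | cons y ys =>
      intro k hk
      cases k with
      | zero => simp
      | succ k =>
        simp only [List.take_succ_cons, List.cons_eq_cons]
        by_cases h : y = x
        · subst h
          have := ih ys k (by simp at hk ⊢; omega)
          simp [natIg, this]
        · have hn : natIg (x :: xs) (y :: ys) = 0 := by simp [natIg, h]
          rw [hn]
          constructor
          · rintro ⟨h1, -⟩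
            exact absurd h1.symm h
          · intro hc
            omega

-- the binary search returns N whenever pred answers "k ≤ N" on the remaining interval
lemma bsearch_eq (pred : Nat → Bool) (N : Nat) :
    ∀ fuel lo hi, lo ≤ N → N ≤ hi → hi - lo ≤ fuel →
    (∀ k, lo < k → k ≤ hi → (pred k = true ↔ k ≤ N)) →
    pvBSearch pred lo hi fuel = N := by
  intro fuel
  induction fuel with
  | zero => intro lo hi h1 h2 h3 _; simp only [pvBSearch]; omega
  | succ fuel ih =>
    intro lo hi h1 h2 h3 hp
    simp only [pvBSearch]
    by_cases hlt : lo < hi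
    · rw [if_pos hlt]
      have hmid1 : lo < (lo + hi + 1) / 2 := by omega
      have hmid2 : (lo + hi + 1) / 2 ≤ hi := by omega
      by_cases hpm : pred ((lo + hi + 1) / 2) = true
      · have hN : (lo + hi + 1) / 2 ≤ N := (hp _ hmid1 hmid2).mp hpm
        simp only [hpm, if_true]
        exact ih _ _ hN h2 (by omega) (fun k hk1 hk2 => hp k (by omega) hk2)
      · have hN : N < (lo + hi + 1) / 2 := by
          by_contra hc
          exact hpm ((hp _ hmid1 hmid2).mpr (by omega))
        simp only [hpm]
        exact ih _ _ h1 (by omega) (by omega) (fun k hk1 hk2 => hp k hk1 (by omega))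
    · rw [if_neg hlt]; omega

lemma prefixLen_eq (p t : String) :
    pvPrefixLen p t = iguales_anterior p.toList t.toList := by
  rw [iguales_eq_natIg]
  have h := bsearch_eq (fun k => p.toList.take k == t.toList.take k)
    (natIg p.toList t.toList) (min p.toList.length t.toList.length) 0
    (min p.toList.length t.toList.length) (Nat.zero_le _) (natIg_le _ _) (by omega)
    (fun k _ hk2 => by
      rw [beq_iff_eq]
      exact take_eq_iff p.toList t.toList k hk2)
  simp only [pvPrefixLen]
  exact_mod_cast h

-- ---- B's staged passes compute the triA components ----

lemma zip_shift (p t : String) (ts : List String) :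
    ((p :: (t :: ts).dropLast).zip (t :: ts)) = (p, t) :: ((t :: ts.dropLast).zip ts) := by
  cases ts with
  | nil => simp
  | cons u us => simp [List.dropLast_cons₂]

lemma igu_eq (nv : Int) (ts : List String) :
    ∀ (p : String) (i : Int),
    (PySem.List.enumerate ((p :: ts.dropLast).zip ts) i).map
        (fun q => if PySem.Int.mod q.1 nv = 0 then (0 : Int) else pvPrefixLen q.2.1 q.2.2)
      = (triA nv (some p) i ts).map (fun c => c.1) := by
  induction ts with
  | nil => intro p i; simp [triA]
  | cons t ts ih =>
    intro p i
    rw [zip_shift, PySem.List.enumerate_cons]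
    simp only [List.map_cons, triA]
    refine congrArg₂ _ ?_ (ih t (i + 1))
    by_cases hm : PySem.Int.mod i nv = 0
    · simp [pvTriple, hm]
    · simp [pvTriple, hm, prefixLen_eq]

lemma triA_d (nv : Int) (ts : List String) :
    ∀ (prev : Option String) (i : Int),
    (ts.zip ((triA nv prev i ts).map (fun c => c.1))).map
        (fun q => (q.1.toList.length : Int) - q.2)
      = (triA nv prev i ts).map (fun c => c.2.1) := by
  induction ts with
  | nil => intro prev i; simp [triA]
  | cons t ts ih =>
    intro prev i
    simp only [triA, List.map_cons, List.zip_cons_cons]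
    refine congrArg₂ _ ?_ (ih (some t) (i + 1))
    simp only [pvTriple]
    by_cases hm : PySem.Int.mod i nv = 0 <;> simp [hm]

lemma triA_f (nv : Int) (ts : List String) :
    ∀ (prev : Option String) (i : Int),
    (ts.zip ((triA nv prev i ts).map (fun c => c.1))).map
        (fun q => String.ofList (q.1.toList.drop q.2.toNat))
      = (triA nv prev i ts).map (fun c => c.2.2) := by
  induction ts with
  | nil => intro prev i; simp [triA]
  | cons t ts ih =>
    intro prev i
    simp only [triA, List.map_cons, List.zip_cons_cons]
    refine congrArg₂ _ ?_ (ih (some t) (i + 1))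
    simp only [pvTriple]
    by_cases hm : PySem.Int.mod i nv = 0 <;> simp [hm]

-- at index 0 the block branch fires (0 % n == 0), so the unused previous word is irrelevant
lemma triA_none (nv : Int) (ts : List String) :
    triA nv none 0 ts = triA nv (some "") 0 ts := by
  cases ts with
  | nil => rfl
  | cons t ts =>
    have h0 : PySem.Int.mod 0 nv = 0 := (PySem.Int.mod_eq_zero_iff_dvd 0 nv).mpr (dvd_zero nv)
    simp [triA, pvTriple, h0]

-- assembly: both ports equal the componentwise reading of triA
lemma main_eq (nv : Int) (ts : List String) :
    crear_lexico_front_coding ts (some nv) = crear_lexico_front_coding_alt ts (some nv) := by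
  have HF := foldA nv ts none [] [] [] 0 rfl rfl
  simp only [List.dropLast_nil, List.foldl_nil, List.length_nil, Nat.cast_zero,
    List.nil_append] at HF
  obtain ⟨H1, H2, H3, H4⟩ := HF
  show (_, _, _, _) = (_, _, _, _)
  rw [H1, H2, H3, H4, igu_eq nv ts "" 0, ← triA_none, triA_d nv ts none 0, triA_f nv ts none 0]

-- ===== VERDICT (by name: the statement is the Claim_ definition above) =====
theorem crear_lexico_front_coding_spec : Claim_equal_crear_lexico_front_coding := by
  unfold Claim_equal_crear_lexico_front_coding
  intro terminos n hdom hpre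
  unfold Spec_crear_lexico_front_coding
  rcases n with _ | v
  · have h := main_eq ((terminos.length : Int)) terminos
    simpa only [crear_lexico_front_coding, crear_lexico_front_coding_alt] using h
  · exact main_eq v terminos
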